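-- pv_equiv track=rewrite | github.com/daipe-ai/dbx-deploy | src/dbxdeploy/notebook/converter/markdowns_converter.py | to_jupyter_markdown
-- ===== SOURCE A (Python) =====
-- def to_jupyter_markdown(source: str) -> str:
--     magic_removed = source.replace("# MAGIC ", "# ")
--     magic_removed = magic_removed.replace("# MAGIC", "#")
--     empty_lines_removed = magic_removed.replace("# %%\n\n", "# %%\n")
--     lines = empty_lines_removed.split("\n")
--     processed_file = []
--     for index, line in enumerate(lines):
--         if line.startswith("# %md"):
--             if line.__len__() > 5:
--                 markdown_separated = "#" + line[5:]
--                 lines.insert(index + 1, markdown_separated)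
--             if index > 0 and lines[index - 1] == "# %%":
--                 previous_value = lines[index - 1]
--                 previous_value_replaced = previous_value.replace("# %%", "# %% [markdown]")
--                 processed_file = processed_file[:-1]
--                 processed_file.append(previous_value_replaced)
--         else:
--             processed_file.append(line)
--
--     return "\n".join(processed_file)
-- ===== SOURCE B (Python) =====
-- def to_jupyter_markdown(source: str) -> str:
--     text = source.replace("# MAGIC ", "# ")
--     text = text.replace("# MAGIC", "#")
--     text = text.replace("# %%\n\n", "# %%\n")
--     out = []
--     for line in text.split("\n"):
--         if line.startswith("# %md"):
--             if out and out[-1] == "# %%":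
--                 out[-1] = "# %% [markdown]"
--             while line.startswith("# %md") and len(line) > 5:
--                 line = "#" + line[5:]
--             if line != "# %md":
--                 out.append(line)
--         else:
--             out.append(line)
--     return "\n".join(out)
-- ===== Notes on version B (the rewrite author's own statement) =====
-- stated objective: simpler
-- what changed: Replaces A's in-place mutation of the lines list while iterating (insert(index+1,...) plus slice-and-reappend of processed_file) with a single pass over the split lines that reduces markdown-magic prefixes in a small while loop and checks the last output line directly.
import Mathlib
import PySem

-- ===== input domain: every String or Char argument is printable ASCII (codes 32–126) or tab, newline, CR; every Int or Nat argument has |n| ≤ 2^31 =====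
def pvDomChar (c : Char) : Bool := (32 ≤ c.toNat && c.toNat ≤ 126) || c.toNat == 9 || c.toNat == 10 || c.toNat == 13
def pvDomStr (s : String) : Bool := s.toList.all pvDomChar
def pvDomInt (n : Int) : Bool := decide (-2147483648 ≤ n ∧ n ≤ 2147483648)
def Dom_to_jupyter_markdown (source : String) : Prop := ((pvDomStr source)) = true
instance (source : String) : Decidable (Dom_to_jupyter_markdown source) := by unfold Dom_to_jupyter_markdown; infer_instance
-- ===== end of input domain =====

-- B replaces A's in-place list mutation (insert while iterating, slice-and-reappend of the
-- output) by a single pass that reduces '# %md' prefixes with a while loop and checks the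
-- last output line directly — simpler, and the return value is unchanged.

-- line[5:] is PySem.List.slice; this lemma lets the ports' termination arguments see its length
theorem pv_slice5_eq_drop (l : List Char) : PySem.List.slice l (some 5) none = l.drop 5 := by
  simp [pysem]

-- ===== PORT A =====
-- the loop of A: `prev` is lines[index-1] of the (mutated) list, `acc` is processed_file;
-- an inserted line ("#" + line[5:]) is consed onto the remaining lines, exactly as
-- lines.insert(index + 1, …) makes it the next element the for-loop visits.
def to_jupyter_markdown_goA (prev : Option (List Char)) (acc : List (List Char)) :
    List (List Char) → List (List Char)
  | [] => acc
  | line :: rest =>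
    if PySem.Chars.startswith line "# %md".toList then
      let rest' := if 5 < line.length then
          ('#' :: PySem.List.slice line (some 5) none) :: rest else rest
      let acc' := match prev with
        | some p =>
          if p == "# %%".toList then
            acc.dropLast ++ [PySem.Chars.replace p "# %%".toList "# %% [markdown]".toList]
          else acc
        | none => acc
      to_jupyter_markdown_goA (some line) acc' rest'
    else
      to_jupyter_markdown_goA (some line) (acc ++ [line]) rest
  termination_by ls => ls.foldr (fun s m => s.length + 1 + m) 0
  decreasing_by
    · simp only [pv_slice5_eq_drop]
      split <;> simp [List.foldr] <;> omega
    · simp [List.foldr] <;> omega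

def to_jupyter_markdown (source : String) : String :=
  let magic_removed := PySem.Chars.replace source.toList "# MAGIC ".toList "# ".toList
  let magic_removed := PySem.Chars.replace magic_removed "# MAGIC".toList "#".toList
  let empty_lines_removed := PySem.Chars.replace magic_removed "# %%\n\n".toList "# %%\n".toList
  let lines := PySem.Chars.splitOn empty_lines_removed "\n".toList
  String.ofList (PySem.Chars.join "\n".toList (to_jupyter_markdown_goA none [] lines))

-- ===== PORT B =====
-- Source B's while loop: while line.startswith("# %md") and len(line) > 5: line = "#" + line[5:]
def to_jupyter_markdown_reduceB (line : List Char) : List Char :=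
  if PySem.Chars.startswith line "# %md".toList = true ∧ 5 < line.length then
    to_jupyter_markdown_reduceB ('#' :: PySem.List.slice line (some 5) none)
  else line
  termination_by line.length
  decreasing_by simp only [pv_slice5_eq_drop]; simp; omega

-- Source B's for loop: `out` is the output list; `out and out[-1] == "# %%"` is the getLast? test
def to_jupyter_markdown_goB (out : List (List Char)) :
    List (List Char) → List (List Char)
  | [] => out
  | line :: rest =>
    if PySem.Chars.startswith line "# %md".toList then
      let out' := if out.getLast? == some "# %%".toList then
          out.dropLast ++ ["# %% [markdown]".toList] else out
      let l := to_jupyter_markdown_reduceB line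
      if l = "# %md".toList then to_jupyter_markdown_goB out' rest
      else to_jupyter_markdown_goB (out' ++ [l]) rest
    else
      to_jupyter_markdown_goB (out ++ [line]) rest

def to_jupyter_markdown_alt (source : String) : String :=
  let text := PySem.Chars.replace source.toList "# MAGIC ".toList "# ".toList
  let text := PySem.Chars.replace text "# MAGIC".toList "#".toList
  let text := PySem.Chars.replace text "# %%\n\n".toList "# %%\n".toList
  String.ofList (PySem.Chars.join "\n".toList
    (to_jupyter_markdown_goB [] (PySem.Chars.splitOn text "\n".toList)))

-- ===== PRECONDITION & SPEC =====
def Spec_to_jupyter_markdown (source : String) (out : String) : Prop := out = to_jupyter_markdown_alt source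
instance (source : String) (out : String) : Decidable (Spec_to_jupyter_markdown source out) := by unfold Spec_to_jupyter_markdown; infer_instance

-- ===== CLAIM (what is proved, stated in full; the proofs are below) =====
def Claim_equal_to_jupyter_markdown : Prop := ∀ (source : String), Dom_to_jupyter_markdown source → Spec_to_jupyter_markdown source (to_jupyter_markdown source)

-- ===== LEMMAS AND PROOFS =====

-- a line starting with '# %md' is not '# %%'
theorem pv_md_ne (line : List Char)
    (h : PySem.Chars.startswith line "# %md".toList = true) : line ≠ "# %%".toList := by
  intro he; subst he; revert h; decide

-- a line starting with '# %md' of length ≤ 5 is exactly '# %md'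
theorem pv_md_eq (line : List Char)
    (h : PySem.Chars.startswith line "# %md".toList = true)
    (hl : ¬ 5 < line.length) : line = "# %md".toList := by
  rw [PySem.Chars.startswith_iff] at h
  have := h.length_le
  exact (List.IsPrefix.eq_of_length h (by simp at this ⊢; omega)).symm

-- one unfolding of A's loop on a '# %md' line, with the accumulator rewrite made explicit
theorem pv_goA_md_step (line : List Char)
    (hmd : PySem.Chars.startswith line "# %md".toList = true)
    (prev : Option (List Char)) (acc rest : List (List Char)) :
    to_jupyter_markdown_goA prev acc (line :: rest) =
      to_jupyter_markdown_goA (some line)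
        (if prev == some "# %%".toList then
          acc.dropLast ++ ["# %% [markdown]".toList] else acc)
        (if 5 < line.length then
          ('#' :: PySem.List.slice line (some 5) none) :: rest else rest) := by
  have h2' : PySem.Chars.replace ['#',' ','%','%'] ['#',' ','%','%']
      ['#',' ','%','%',' ','[','m','a','r','k','d','o','w','n',']']
      = ['#',' ','%','%',' ','[','m','a','r','k','d','o','w','n',']'] := by decide
  cases prev with
  | none => rw [to_jupyter_markdown_goA, if_pos hmd]; simp
  | some p =>
    rw [to_jupyter_markdown_goA, if_pos hmd]
    by_cases hpe : p = "# %%".toList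
    · subst hpe; simp [h2']
    · have hpe' : ¬ p = ['#',' ','%','%'] := by simpa using hpe
      simp [hpe']

-- one unfolding of A's loop on a non-'# %md' line
theorem pv_goA_nonmd_step (line : List Char)
    (hmd : ¬ PySem.Chars.startswith line "# %md".toList = true)
    (prev : Option (List Char)) (acc rest : List (List Char)) :
    to_jupyter_markdown_goA prev acc (line :: rest) =
      to_jupyter_markdown_goA (some line) (acc ++ [line]) rest := by
  cases prev <;> rw [to_jupyter_markdown_goA, if_neg hmd]

-- A's per-element cascade: from any previous element ≠ '# %%', processing one source line
-- (with its chain of inserted reductions) behaves like one pass of B's while loop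
theorem pv_cascade (n : Nat) : ∀ (line : List Char), line.length ≤ n →
    ∀ (p : List Char), p ≠ "# %%".toList → ∀ acc rest,
    to_jupyter_markdown_goA (some p) acc (line :: rest) =
      (if to_jupyter_markdown_reduceB line = "# %md".toList then
        to_jupyter_markdown_goA (some "# %md".toList) acc rest
      else
        to_jupyter_markdown_goA (some (to_jupyter_markdown_reduceB line))
          (acc ++ [to_jupyter_markdown_reduceB line]) rest) := by
  induction n with
  | zero =>
    intro line hn p hp acc rest
    have hline : line = [] := List.eq_nil_of_length_eq_zero (by omega)
    subst hline
    rw [to_jupyter_markdown_goA, to_jupyter_markdown_reduceB]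
    simp [PySem.Chars.startswith]
  | succ m ih =>
    intro line hn p hp acc rest
    by_cases hmd : PySem.Chars.startswith line "# %md".toList = true
    · rw [pv_goA_md_step line hmd]
      rw [if_neg (by simpa using hp)]
      by_cases hl : 5 < line.length
      · rw [if_pos hl]
        have hlen : ('#' :: PySem.List.slice line (some 5) none).length ≤ m := by
          rw [pv_slice5_eq_drop]; simp; omega
        rw [ih _ hlen line (pv_md_ne line hmd)]
        have hstep : to_jupyter_markdown_reduceB line =
            to_jupyter_markdown_reduceB ('#' :: PySem.List.slice line (some 5) none) := by
          rw [to_jupyter_markdown_reduceB]; rw [if_pos ⟨hmd, hl⟩]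
        rw [hstep]
      · rw [if_neg hl]
        have hred : to_jupyter_markdown_reduceB line = line := by
          rw [to_jupyter_markdown_reduceB, if_neg (by tauto)]
        rw [hred, pv_md_eq line hmd hl]
        simp
    · rw [to_jupyter_markdown_goA, if_neg hmd]
      have hred : to_jupyter_markdown_reduceB line = line := by
        rw [to_jupyter_markdown_reduceB, if_neg (by tauto)]
      rw [hred, if_neg (fun he => hmd (by rw [he]; decide))]

-- the invariant: A's previous-element test agrees with B's last-output-line test
theorem pv_go_eq (ls : List (List Char)) : ∀ (prev : Option (List Char)) (acc : List (List Char)),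
    (prev == some "# %%".toList) = (acc.getLast? == some "# %%".toList) →
    to_jupyter_markdown_goA prev acc ls = to_jupyter_markdown_goB acc ls := by
  induction ls with
  | nil => intro prev acc _; rw [to_jupyter_markdown_goA, to_jupyter_markdown_goB]
  | cons line rest ih =>
    intro prev acc hinv
    by_cases hmd : PySem.Chars.startswith line "# %md".toList = true
    · rw [pv_goA_md_step line hmd, to_jupyter_markdown_goB, if_pos hmd]
      rw [hinv]
      set acc' := (if acc.getLast? == some "# %%".toList then
          acc.dropLast ++ ["# %% [markdown]".toList] else acc) with hacc'
      have hinv' : (some "# %md".toList == some "# %%".toList)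
          = (acc'.getLast? == some "# %%".toList) := by
        have h1 : (some "# %md".toList == some "# %%".toList) = false := by decide
        rw [h1, hacc']
        by_cases hc : (acc.getLast? == some "# %%".toList) = true
        · rw [if_pos hc, List.getLast?_concat]
          decide
        · rw [if_neg hc]
          exact (Bool.eq_false_iff.mpr hc).symm
      by_cases hl : 5 < line.length
      · rw [if_pos hl]
        rw [pv_cascade ('#' :: PySem.List.slice line (some 5) none).length _ le_rfl
            line (pv_md_ne line hmd)]
        have hred : to_jupyter_markdown_reduceB line =
            to_jupyter_markdown_reduceB ('#' :: PySem.List.slice line (some 5) none) := by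
          conv_lhs => rw [to_jupyter_markdown_reduceB, if_pos ⟨hmd, hl⟩]
        rw [← hred]
        by_cases hb : to_jupyter_markdown_reduceB line = "# %md".toList
        · rw [if_pos hb, if_pos hb]
          exact ih _ _ hinv'
        · rw [if_neg hb, if_neg hb]
          exact ih _ _ (by simp)
      · rw [if_neg hl]
        have hle : line = "# %md".toList := pv_md_eq line hmd hl
        have hred : to_jupyter_markdown_reduceB line = line := by
          rw [to_jupyter_markdown_reduceB, if_neg (by tauto)]
        rw [hred, if_pos hle, hle]
        exact ih _ _ hinv'
    · rw [pv_goA_nonmd_step line hmd, to_jupyter_markdown_goB, if_neg hmd]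
      exact ih _ _ (by simp)

-- ===== VERDICT (by name: the statement is the Claim_ definition above) =====
theorem to_jupyter_markdown_spec : Claim_equal_to_jupyter_markdown := by
  intro source _
  unfold Spec_to_jupyter_markdown
  simp only [to_jupyter_markdown, to_jupyter_markdown_alt]
  rw [pv_go_eq _ none [] (by simp)]
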